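-- pv_equiv track=rewrite | github.com/dmarquette18/Golden-Globe-Scanner | NomineeGather.py | voteCategories
-- ===== SOURCE A (Python) =====
-- def voteCategories(namesAndKeywords, awards):
--     tempDict ={}
--     for keys in namesAndKeywords:
--         tempkeys = namesAndKeywords[keys]
--         if len(tempkeys) >= 5:
--             tempkeys = list(tempkeys)
--             tempkeys = tempkeys[-5:]
--         else:
--             tempkeys = tempkeys
--         tempDict[keys] = tempkeys
--
--     namesAndKeywords = tempDict
--     posCat = {}
--     for name in namesAndKeywords:
--         for award in awards:
--             for item in awards[award]:
--                 item = item.lower()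
--                 if item in namesAndKeywords[name] and item != "best" and item != "award" and item != "picture" and item != "motion":
--                     if name in posCat:
--                         posCat[name].append(award)
--                     else:
--                         posCat[name] = [award]
--
--
--     return posCat
-- ===== SOURCE B (Python) =====
-- def voteCategories(namesAndKeywords, awards):
--     stop = {"best", "award", "picture", "motion"}
--     # keep (up to) the last 5 keywords of each name, as a set
--     kwsets = {name: set(kws[-5:]) for name, kws in namesAndKeywords.items()}
--     # inverted index: keyword -> names (in original name order)
--     index = {}
--     for name, s in kwsets.items():
--         for kw in s:
--             index.setdefault(kw, []).append(name)
--     # single pass over award items, appending the award to every matching name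
--     acc = {}
--     for award, items in awards.items():
--         for item in items:
--             it = item.lower()
--             if it in stop:
--                 continue
--             for name in index.get(it, ()):
--                 acc.setdefault(name, []).append(award)
--     # rebuild in original name order
--     return {name: acc[name] for name in kwsets if name in acc}
-- ===== Notes on version B (the rewrite author's own statement) =====
-- stated objective: faster
-- what changed: B builds an inverted index keyword->names once, then makes a single pass over the award items appending the award to each matching name, and finally rebuilds the result dict in original name order, instead of A's triple nested loop testing every award item against every name's keyword list.
import Mathlib
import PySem

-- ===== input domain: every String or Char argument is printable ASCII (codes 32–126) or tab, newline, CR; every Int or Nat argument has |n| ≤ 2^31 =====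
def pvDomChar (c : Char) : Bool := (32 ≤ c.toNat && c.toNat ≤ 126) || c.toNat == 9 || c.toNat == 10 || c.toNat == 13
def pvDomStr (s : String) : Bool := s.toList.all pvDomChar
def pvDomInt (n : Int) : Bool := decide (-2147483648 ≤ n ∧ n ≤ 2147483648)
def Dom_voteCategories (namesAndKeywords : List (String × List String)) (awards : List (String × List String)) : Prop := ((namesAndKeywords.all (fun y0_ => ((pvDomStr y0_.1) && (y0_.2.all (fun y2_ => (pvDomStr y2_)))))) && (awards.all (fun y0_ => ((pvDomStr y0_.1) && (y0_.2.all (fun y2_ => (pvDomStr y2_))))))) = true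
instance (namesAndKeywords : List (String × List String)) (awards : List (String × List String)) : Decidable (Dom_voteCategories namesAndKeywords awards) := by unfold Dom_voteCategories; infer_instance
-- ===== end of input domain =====

-- B replaces A's triple nested scan with an inverted keyword->names index and a single pass
-- over the award items (objective: faster; asymptotic change).
-- ===== PORT A =====
def voteCategories (namesAndKeywords : List (String × List String)) (awards : List (String × List String)) : List (String × List String) :=
  let nk := PySem.Dict.ofList namesAndKeywords
  let tempDict := nk.keys.foldl (fun t keys =>
      let tempkeys := nk.getD keys []
      let tempkeys := if tempkeys.length ≥ 5 then PySem.List.slice tempkeys (some (-5)) none else tempkeys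
      t.insert keys tempkeys) PySem.Dict.empty
  let awd := PySem.Dict.ofList awards
  let posCat := tempDict.keys.foldl (fun pc name =>
      awd.keys.foldl (fun pc award =>
        (awd.getD award []).foldl (fun pc item0 =>
          let item := PySem.Str.lower item0
          if item ∈ tempDict.getD name [] ∧ item ≠ "best" ∧ item ≠ "award" ∧ item ≠ "picture" ∧ item ≠ "motion" then
            if pc.contains name then pc.modify name [] (fun l => l ++ [award])
            else pc.insert name [award]
          else pc) pc) pc) PySem.Dict.empty
  posCat.items

-- ===== PORT B =====
def voteCategories_alt (namesAndKeywords : List (String × List String)) (awards : List (String × List String)) : List (String × List String) :=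
  let stop : PySem.Set String := PySem.Set.ofList ["best", "award", "picture", "motion"]
  let kwsets := (PySem.Dict.ofList namesAndKeywords).items.map
      (fun p => (p.1, PySem.Set.ofList (PySem.List.slice p.2 (some (-5)) none)))
  let index := kwsets.foldl (fun ix p =>
      p.2.foldl (fun ix kw => ix.modify kw [] (fun l => l ++ [p.1])) ix) PySem.Dict.empty
  let acc := (PySem.Dict.ofList awards).items.foldl (fun acc q =>
      q.2.foldl (fun acc item =>
        let it := PySem.Str.lower item
        if it ∈ stop then acc
        else (index.getD it []).foldl (fun acc name => acc.modify name [] (fun l => l ++ [q.1])) acc) acc) PySem.Dict.empty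
  kwsets.filterMap (fun p => (acc.get? p.1).map (fun l => (p.1, l)))

-- ===== PRECONDITION & SPEC =====
def Spec_voteCategories (namesAndKeywords : List (String × List String)) (awards : List (String × List String)) (out : List (String × List String)) : Prop := out = voteCategories_alt namesAndKeywords awards
instance (namesAndKeywords : List (String × List String)) (awards : List (String × List String)) (out : List (String × List String)) : Decidable (Spec_voteCategories namesAndKeywords awards out) := by unfold Spec_voteCategories; infer_instance

-- ===== CLAIM (what is proved, stated in full; the proofs are below) =====
def Claim_equal_voteCategories : Prop := ∀ (namesAndKeywords : List (String × List String)) (awards : List (String × List String)), Dom_voteCategories namesAndKeywords awards → Spec_voteCategories namesAndKeywords awards (voteCategories namesAndKeywords awards)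

-- ===== LEMMAS AND PROOFS =====

-- proof-layer abbreviations
def pvStep (d : PySem.Dict String (List String)) (p : String × String) : PySem.Dict String (List String) :=
  d.modify p.1 [] (fun l => l ++ [p.2])

def pvBuild (l : List (String × String)) : PySem.Dict String (List String) :=
  l.foldl pvStep PySem.Dict.empty

-- A's match condition, on the lowered item
abbrev pvOk (item : String) (kws : List String) : Prop :=
  item ∈ kws ∧ item ≠ "best" ∧ item ≠ "award" ∧ item ≠ "picture" ∧ item ≠ "motion"

-- flattened (award, item) pairs, in loop order
def pvP (awards : List (String × List String)) : List (String × String) :=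
  (PySem.Dict.ofList awards).items.flatMap (fun q => q.2.map (fun it => (q.1, it)))

-- awards matched by a keyword list, in loop order
def pvM (P : List (String × String)) (kws : List String) : List String :=
  P.filterMap (fun q => if pvOk (PySem.Str.lower q.2) kws then some q.1 else none)

-- names with their (deduplicated) trailing-5 keyword sets
def pvL (namesAndKeywords : List (String × List String)) : List (String × List String) :=
  (PySem.Dict.ofList namesAndKeywords).items.map
    (fun p => (p.1, (PySem.Set.ofList (PySem.List.slice p.2 (some (-5)) none) : List String)))

-- A's name-major (name, award) pair sequence
def pvLA (L : List (String × List String)) (P : List (String × String)) : List (String × String) :=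
  L.flatMap (fun p => (pvM P p.2).map (fun a => (p.1, a)))

-- B's award-major (name, award) pair sequence
def pvLB (L : List (String × List String)) (P : List (String × String)) : List (String × String) :=
  P.flatMap (fun q =>
    if PySem.Str.lower q.2 ∈ (PySem.Set.ofList ["best", "award", "picture", "motion"] : List String) then []
    else (L.filter (fun r => decide (PySem.Str.lower q.2 ∈ r.2))).map (fun r => (r.1, q.1)))

-- the common normal form of both results
def pvRes (L : List (String × List String)) (P : List (String × String)) : List (String × List String) :=
  L.filterMap (fun p => if pvM P p.2 = [] then none else some (p.1, pvM P p.2))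

-- generic loop-shape lemmas --------------------------------------------------

theorem pvFilter_beq_nil {ν : Type} (l : List (String × ν)) (k : String)
    (h : k ∉ l.map (·.1)) : l.filter (fun p => p.1 == k) = [] := by
  rw [List.filter_eq_nil_iff]
  intro p hp hbeq
  exact h (List.mem_map.mpr ⟨p, hp, by simpa using hbeq⟩)

theorem pvMem_map_fst_iff_filter {ν : Type} (l : List (String × ν)) (k : String) :
    k ∈ l.map (·.1) ↔ l.filter (fun p => p.1 == k) ≠ [] := by
  constructor
  · intro hk hnil
    obtain ⟨p, hp, hpk⟩ := List.mem_map.mp hk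
    have := (List.filter_eq_nil_iff.mp hnil) p hp
    simp [hpk] at this
  · intro h
    by_contra hk
    exact h (pvFilter_beq_nil l k hk)

-- modify-vs-insert branch in A
theorem pvModify_if (pc : PySem.Dict String (List String)) (name award : String) :
    (if pc.contains name = true then pc.modify name [] (fun l => l ++ [award])
     else pc.insert name [award]) = pc.modify name [] (fun l => l ++ [award]) := by
  by_cases h : pc.contains name = true
  · simp [h]
  · have h' : pc.contains name = false := by simpa using h
    simp [h, PySem.Dict.modify, PySem.Dict.getD_of_not_contains _ _ h']

-- characterization of pvBuild -------------------------------------------------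

theorem pvBuild_keys (l : List (String × String)) :
    (pvBuild l).keys = PySem.Set.ofList (l.map (·.1)) := by
  unfold pvBuild pvStep
  rw [PySem.Dict.keys_foldl_modify_key l (fun p => p.1) [] (fun _ p => fun v => v ++ [p.2]) PySem.Dict.empty,
    PySem.Dict.keys_empty, PySem.Set.update_nil_left]

theorem pvBuild_nodup (l : List (String × String)) : (pvBuild l).keys.Nodup := by
  rw [pvBuild_keys]; exact PySem.Set.nodup_ofList _

theorem pvBuild_getD (l : List (String × String)) (k : String) :
    (pvBuild l).getD k [] = (l.filter (fun p => p.1 == k)).map (·.2) := by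
  unfold pvBuild pvStep
  rw [PySem.Dict.getD_foldl_modify_append l PySem.Dict.empty k]
  simp [PySem.Dict.getD_empty]

theorem pvBuild_items (l : List (String × String)) :
    (pvBuild l).items
      = (PySem.Set.ofList (l.map (·.1))).map (fun k => (k, (l.filter (fun p => p.1 == k)).map (·.2))) := by
  rw [PySem.Dict.items_eq_map_keys (pvBuild l) (pvBuild_nodup l) [], pvBuild_keys]
  exact List.map_congr_left (fun k _ => by rw [pvBuild_getD])

theorem pvBuild_get? (l : List (String × String)) (k : String) :
    (pvBuild l).get? k
      = if k ∈ l.map (·.1) then some ((l.filter (fun p => p.1 == k)).map (·.2)) else none := by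
  by_cases h : k ∈ l.map (·.1)
  · have hc : (pvBuild l).contains k = true := by
      rw [PySem.Dict.contains_iff_mem_keys, pvBuild_keys, PySem.Set.mem_ofList]; exact h
    rw [PySem.Dict.contains_eq_isSome_get?] at hc
    obtain ⟨v, hv⟩ := Option.isSome_iff_exists.mp hc
    have : (pvBuild l).getD k [] = v := by rw [PySem.Dict.getD_eq_get?_getD, hv]; rfl
    rw [hv, if_pos h, ← this, pvBuild_getD]
  · have hc : (pvBuild l).contains k = false := by
      rw [← Bool.not_eq_true, PySem.Dict.contains_iff_mem_keys, pvBuild_keys, PySem.Set.mem_ofList]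
      exact h
    rw [if_neg h, PySem.Dict.get?_eq_none_iff_contains]; exact hc

-- keys-to-items fold conversion
theorem pvFoldl_keys_getD {γ : Type} (d : PySem.Dict String (List String)) (hnd : d.keys.Nodup)
    (g : γ → String → List String → γ) (init : γ) :
    d.keys.foldl (fun acc k => g acc k (d.getD k [])) init = d.items.foldl (fun acc p => g acc p.1 p.2) init := by
  rw [PySem.Dict.items_eq_map_keys d hnd [], List.foldl_map]

-- core combinatorics ----------------------------------------------------------

theorem pvLA_fst_sub (L : List (String × List String)) (P : List (String × String)) :
    ∀ x ∈ (pvLA L P).map (·.1), x ∈ L.map (·.1) := by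
  intro x hx
  simp only [pvLA, List.mem_map, List.mem_flatMap] at hx
  obtain ⟨r, ⟨p, hp, hr⟩, hx⟩ := hx
  obtain ⟨a, _, rfl⟩ := hr
  exact List.mem_map.mpr ⟨p, hp, hx⟩

theorem pvOfList_map_const {α : Type} (l : List α) (a : String) :
    PySem.Set.ofList (l.map (fun _ => a)) = if l = [] then ([] : List String) else [a] := by
  induction l with
  | nil => simp
  | cons x t ih =>
    simp only [List.map_cons, PySem.Set.ofList_cons, ih]
    by_cases ht : t = [] <;> simp [ht, PySem.Set.discard]

theorem pvCoreA (L : List (String × List String)) (P : List (String × String))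
    (hnd : (L.map (·.1)).Nodup) :
    (pvBuild (pvLA L P)).items = pvRes L P := by
  induction L with
  | nil => simp [pvBuild_items, pvLA, pvRes]
  | cons p L' ih =>
    simp only [List.map_cons, List.nodup_cons] at hnd
    obtain ⟨hp1, hnd'⟩ := hnd
    by_cases hM : pvM P p.2 = []
    · have hla : pvLA (p :: L') P = pvLA L' P := by
        simp [pvLA, List.flatMap_cons, hM]
      rw [hla, ih hnd']
      simp [pvRes, hM]
    · have hla : pvLA (p :: L') P
          = (pvM P p.2).map (fun a => (p.1, a)) ++ pvLA L' P := by
        simp [pvLA, List.flatMap_cons]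
      have hblkfst : ((pvM P p.2).map (fun a => (p.1, a))).map (·.1)
          = (pvM P p.2).map (fun _ => p.1) := by simp [List.map_map]
      have hnotinA : p.1 ∉ (pvLA L' P).map (·.1) := fun h => hp1 (pvLA_fst_sub L' P _ h)
      have hset : PySem.Set.ofList ((pvLA (p :: L') P).map (·.1))
          = p.1 :: PySem.Set.ofList ((pvLA L' P).map (·.1)) := by
        rw [hla, List.map_append, hblkfst, PySem.Set.ofList_append,
          pvOfList_map_const, if_neg hM, PySem.Set.update_eq_append_filter]
        have hf : (PySem.Set.ofList ((pvLA L' P).map (·.1))).filter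
              (fun y => !PySem.Set.contains [p.1] y)
            = PySem.Set.ofList ((pvLA L' P).map (·.1)) := by
          rw [List.filter_eq_self]
          intro y hy
          have hy' : y ∈ (pvLA L' P).map (·.1) := (PySem.Set.mem_ofList _ y).mp hy
          have : y ≠ p.1 := fun h => hp1 (h ▸ pvLA_fst_sub L' P _ hy')
          simp [PySem.Set.contains, this]
        rw [hf]
        rfl
      rw [pvBuild_items, hset, List.map_cons]
      have hhead : ((pvLA (p :: L') P).filter (fun q => q.1 == p.1)).map (·.2) = pvM P p.2 := by
        rw [hla, List.filter_append, pvFilter_beq_nil _ _ hnotinA, List.append_nil]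
        have : ((pvM P p.2).map (fun a => (p.1, a))).filter (fun q => q.1 == p.1)
            = (pvM P p.2).map (fun a => (p.1, a)) := by
          rw [List.filter_eq_self]; intro q hq
          obtain ⟨a, _, rfl⟩ := List.mem_map.mp hq
          simp
        rw [this]; simp [List.map_map]
      have htail : (PySem.Set.ofList ((pvLA L' P).map (·.1))).map
            (fun k => (k, ((pvLA (p :: L') P).filter (fun q => q.1 == k)).map (·.2)))
          = (PySem.Set.ofList ((pvLA L' P).map (·.1))).map
            (fun k => (k, ((pvLA L' P).filter (fun q => q.1 == k)).map (·.2))) := by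
        apply List.map_congr_left
        intro k hk
        have hk' : k ∈ (pvLA L' P).map (·.1) := (PySem.Set.mem_ofList _ k).mp hk
        have hkp : k ≠ p.1 := fun h => hp1 (h ▸ pvLA_fst_sub L' P _ hk')
        have hblk : ((pvM P p.2).map (fun a => (p.1, a))).filter (fun q => q.1 == k) = [] := by
          apply pvFilter_beq_nil
          rw [hblkfst]
          intro hmem
          obtain ⟨a, _, h⟩ := List.mem_map.mp hmem
          exact hkp h.symm
        rw [hla, List.filter_append, hblk, List.nil_append]
      rw [hhead, htail, ← pvBuild_items, ih hnd']
      simp [pvRes, hM]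

theorem pvFilter_row (L : List (String × List String)) (p : String × List String)
    (hnd : (L.map (·.1)).Nodup) (hp : p ∈ L) (X : (String × List String) → Bool) :
    L.filter (fun r => r.1 == p.1 && X r) = if X p then [p] else [] := by
  induction L with
  | nil => cases hp
  | cons q L' ih =>
    simp only [List.map_cons, List.nodup_cons] at hnd
    obtain ⟨hq1, hnd'⟩ := hnd
    rcases List.mem_cons.mp hp with rfl | hp'
    · have hrest : L'.filter (fun r => r.1 == p.1 && X r) = [] := by
        rw [List.filter_eq_nil_iff]
        intro r hr hb
        simp only [Bool.and_eq_true, beq_iff_eq] at hb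
        exact hq1 (hb.1 ▸ List.mem_map.mpr ⟨r, hr, rfl⟩)
      by_cases hx : X p <;> simp [hx, hrest]
    · have hq1' : q.1 ≠ p.1 := fun h => hq1 (h ▸ List.mem_map.mpr ⟨p, hp', rfl⟩)
      rw [List.filter_cons]
      simp only [hq1', beq_iff_eq, Bool.and_eq_true]
      rw [ih hnd' hp']
      simp

theorem pvStop_not_ok (w : String) (kws : List String)
    (hw : w ∈ (PySem.Set.ofList ["best", "award", "picture", "motion"] : List String)) :
    ¬ pvOk w kws := by
  intro hok
  obtain ⟨_, h1, h2, h3, h4⟩ := hok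
  have hw' : w = "best" ∨ w = "award" ∨ w = "picture" ∨ w = "motion" := by
    simpa using (PySem.Set.mem_ofList _ w).mp hw
  rcases hw' with h | h | h | h
  · exact h1 h
  · exact h2 h
  · exact h3 h
  · exact h4 h

theorem pvLB_filter (L : List (String × List String)) (P : List (String × String))
    (p : String × List String) (hnd : (L.map (·.1)).Nodup) (hp : p ∈ L) :
    ((pvLB L P).filter (fun r => r.1 == p.1)).map (·.2) = pvM P p.2 := by
  induction P with
  | nil => rfl
  | cons q P' ih =>
    have hlb : pvLB L (q :: P')
        = (if PySem.Str.lower q.2 ∈ (PySem.Set.ofList ["best", "award", "picture", "motion"] : List String) then []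
           else (L.filter (fun r => decide (PySem.Str.lower q.2 ∈ r.2))).map (fun r => (r.1, q.1)))
          ++ pvLB L P' := by
      simp [pvLB, List.flatMap_cons]
    rw [hlb, List.filter_append, List.map_append, ih]
    by_cases hstop : PySem.Str.lower q.2 ∈ (PySem.Set.ofList ["best", "award", "picture", "motion"] : List String)
    · have hok : ¬ pvOk (PySem.Str.lower q.2) p.2 := pvStop_not_ok _ _ hstop
      have h5 : pvM (q :: P') p.2 = pvM P' p.2 := by
        unfold pvM; rw [List.filterMap_cons, if_neg hok]
      simp [hstop, h5]
    · have hchunk : ((L.filter (fun r => decide (PySem.Str.lower q.2 ∈ r.2))).map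
            (fun r => (r.1, q.1))).filter (fun r => r.1 == p.1)
          = (L.filter (fun r => r.1 == p.1 && decide (PySem.Str.lower q.2 ∈ r.2))).map (fun r => (r.1, q.1)) := by
        rw [List.filter_map, List.filter_filter]
        rfl
      rw [if_neg hstop, hchunk, pvFilter_row L p hnd hp]
      by_cases hmem : PySem.Str.lower q.2 ∈ p.2
      · have hok : pvOk (PySem.Str.lower q.2) p.2 := by
          refine ⟨hmem, ?_, ?_, ?_, ?_⟩ <;>
            (intro h; exact hstop (by rw [h]; decide))
        have h5 : pvM (q :: P') p.2 = q.1 :: pvM P' p.2 := by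
          unfold pvM; rw [List.filterMap_cons, if_pos hok]
        simp [hmem, h5]
      · have hok : ¬ pvOk (PySem.Str.lower q.2) p.2 := fun h => hmem h.1
        have h5 : pvM (q :: P') p.2 = pvM P' p.2 := by
          unfold pvM; rw [List.filterMap_cons, if_neg hok]
        simp [hmem, h5]

theorem pvCoreB (L : List (String × List String)) (P : List (String × String))
    (hnd : (L.map (·.1)).Nodup) :
    L.filterMap (fun p => ((pvBuild (pvLB L P)).get? p.1).map (fun v => (p.1, v))) = pvRes L P := by
  unfold pvRes
  apply List.filterMap_congr
  intro p hp
  rw [pvBuild_get?]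
  by_cases hM : pvM P p.2 = []
  · have hfil : (pvLB L P).filter (fun r => r.1 == p.1) = [] := by
      have := pvLB_filter L P p hnd hp
      rw [hM, List.map_eq_nil_iff] at this
      exact this
    have hnotin : p.1 ∉ (pvLB L P).map (·.1) := by
      rw [pvMem_map_fst_iff_filter]
      simp [hfil]
    simp [hnotin, hM]
  · have hfil : (pvLB L P).filter (fun r => r.1 == p.1) ≠ [] := by
      intro h
      exact hM (by rw [← pvLB_filter L P p hnd hp, h]; rfl)
    have hin : p.1 ∈ (pvLB L P).map (·.1) := (pvMem_map_fst_iff_filter _ _).mpr hfil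
    rw [if_pos hin, if_neg hM, Option.map_some, pvLB_filter L P p hnd hp]

-- normalizations --------------------------------------------------------------

theorem pvProc_eq (v : List String) :
    (if v.length ≥ 5 then PySem.List.slice v (some (-5)) none else v) = PySem.List.slice v (some (-5)) none := by
  by_cases h : v.length ≥ 5
  · rw [if_pos h]
  · rw [if_neg h, PySem.List.slice_from_neg_ofNat v 5 (by omega)]
    have : v.length - 5 = 0 := by omega
    rw [this, List.drop_zero]

theorem pvM_ofList (P : List (String × String)) (v : List String) :
    pvM P (PySem.Set.ofList v) = pvM P v := by
  unfold pvM
  apply List.filterMap_congr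
  intro q _
  by_cases h : pvOk (PySem.Str.lower q.2) v
  · rw [if_pos h, if_pos ⟨(PySem.Set.mem_ofList _ _).mpr h.1, h.2⟩]
  · rw [if_neg h, if_neg (fun h' => h ⟨(PySem.Set.mem_ofList _ _).mp h'.1, h'.2⟩)]

theorem pvA_award (kws : List String) (name award : String) (its : List String)
    (pc : PySem.Dict String (List String)) :
    its.foldl (fun pc item0 =>
        let item := PySem.Str.lower item0
        if item ∈ kws ∧ item ≠ "best" ∧ item ≠ "award" ∧ item ≠ "picture" ∧ item ≠ "motion" then
          if pc.contains name then pc.modify name [] (fun l => l ++ [award])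
          else pc.insert name [award]
        else pc) pc
      = ((pvM (its.map (fun it => (award, it))) kws).map (fun a => (name, a))).foldl pvStep pc := by
  induction its generalizing pc with
  | nil => rfl
  | cons it t ih =>
    rw [List.foldl_cons, List.map_cons]
    by_cases h : PySem.Str.lower it ∈ kws ∧ PySem.Str.lower it ≠ "best" ∧ PySem.Str.lower it ≠ "award"
        ∧ PySem.Str.lower it ≠ "picture" ∧ PySem.Str.lower it ≠ "motion"
    · have hm : pvM ((award, it) :: t.map (fun it => (award, it))) kws
          = award :: pvM (t.map (fun it => (award, it))) kws := by
        unfold pvM pvOk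
        rw [List.filterMap_cons]
        simp only [if_pos h]
      rw [hm, List.map_cons, List.foldl_cons, ih]
      have hb : (let item := PySem.Str.lower it
          if item ∈ kws ∧ item ≠ "best" ∧ item ≠ "award" ∧ item ≠ "picture" ∧ item ≠ "motion" then
            if pc.contains name then pc.modify name [] (fun l => l ++ [award])
            else pc.insert name [award]
          else pc) = pvStep pc (name, award) := by
        show (if PySem.Str.lower it ∈ kws ∧ PySem.Str.lower it ≠ "best" ∧ PySem.Str.lower it ≠ "award"
              ∧ PySem.Str.lower it ≠ "picture" ∧ PySem.Str.lower it ≠ "motion" then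
            if pc.contains name then pc.modify name [] (fun l => l ++ [award])
            else pc.insert name [award]
          else pc) = pvStep pc (name, award)
        rw [if_pos h]
        exact pvModify_if pc name award
      rw [hb]
    · have hm : pvM ((award, it) :: t.map (fun it => (award, it))) kws
          = pvM (t.map (fun it => (award, it))) kws := by
        unfold pvM pvOk
        rw [List.filterMap_cons]
        simp only [if_neg h]
      rw [hm, ih]
      have hb : (let item := PySem.Str.lower it
          if item ∈ kws ∧ item ≠ "best" ∧ item ≠ "award" ∧ item ≠ "picture" ∧ item ≠ "motion" then
            if pc.contains name then pc.modify name [] (fun l => l ++ [award])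
            else pc.insert name [award]
          else pc) = pc := by
        show (if PySem.Str.lower it ∈ kws ∧ PySem.Str.lower it ≠ "best" ∧ PySem.Str.lower it ≠ "award"
              ∧ PySem.Str.lower it ≠ "picture" ∧ PySem.Str.lower it ≠ "motion" then
            if pc.contains name then pc.modify name [] (fun l => l ++ [award])
            else pc.insert name [award]
          else pc) = pc
        rw [if_neg h]
      rw [hb]

theorem pvM_append (P Q : List (String × String)) (kws : List String) :
    pvM (P ++ Q) kws = pvM P kws ++ pvM Q kws := by
  unfold pvM; rw [List.filterMap_append]

theorem pvA_items (kws : List String) (name : String) (items : List (String × List String))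
    (pc : PySem.Dict String (List String)) :
    items.foldl (fun pc q =>
        q.2.foldl (fun pc item0 =>
          let item := PySem.Str.lower item0
          if item ∈ kws ∧ item ≠ "best" ∧ item ≠ "award" ∧ item ≠ "picture" ∧ item ≠ "motion" then
            if pc.contains name then pc.modify name [] (fun l => l ++ [q.1])
            else pc.insert name [q.1]
          else pc) pc) pc
      = ((pvM (items.flatMap (fun q => q.2.map (fun it => (q.1, it)))) kws).map
          (fun a => (name, a))).foldl pvStep pc := by
  induction items generalizing pc with
  | nil => rfl
  | cons q t ih =>
    rw [List.foldl_cons, pvA_award kws name q.1 q.2 pc, ih, List.flatMap_cons, pvM_append,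
      List.map_append, List.foldl_append]

theorem pvA_inner (awd : PySem.Dict String (List String)) (hnd : awd.keys.Nodup)
    (name : String) (kws : List String) (pc : PySem.Dict String (List String)) :
    awd.keys.foldl (fun pc award =>
        (awd.getD award []).foldl (fun pc item0 =>
          let item := PySem.Str.lower item0
          if item ∈ kws ∧ item ≠ "best" ∧ item ≠ "award" ∧ item ≠ "picture" ∧ item ≠ "motion" then
            if pc.contains name then pc.modify name [] (fun l => l ++ [award])
            else pc.insert name [award]
          else pc) pc) pc
      = ((pvM (awd.items.flatMap (fun q => q.2.map (fun it => (q.1, it)))) kws).map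
          (fun a => (name, a))).foldl pvStep pc := by
  rw [pvFoldl_keys_getD awd hnd
    (fun pc award items => items.foldl (fun pc item0 =>
      let item := PySem.Str.lower item0
      if item ∈ kws ∧ item ≠ "best" ∧ item ≠ "award" ∧ item ≠ "picture" ∧ item ≠ "motion" then
        if pc.contains name then pc.modify name [] (fun l => l ++ [award])
        else pc.insert name [award]
      else pc) pc) pc]
  exact pvA_items kws name awd.items pc

theorem pvItems_map_fst (nk : List (String × List String)) :
    ((PySem.Dict.ofList nk).items.map (·.1)).Nodup := by
  have h := PySem.Dict.nodup_keys_ofList nk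
  simpa [PySem.Dict.keys] using h

theorem pvLA_pvL (nk : List (String × List String)) (P : List (String × String)) :
    pvLA (pvL nk) P
      = ((PySem.Dict.ofList nk).items.map
          (fun p => (p.1, PySem.List.slice p.2 (some (-5)) none))).flatMap
          (fun p => (pvM P p.2).map (fun a => (p.1, a))) := by
  unfold pvLA pvL
  rw [List.flatMap_map, List.flatMap_map]
  simp only [pvM_ofList]

theorem pvNormA (namesAndKeywords awards : List (String × List String)) :
    voteCategories namesAndKeywords awards = (pvBuild (pvLA (pvL namesAndKeywords) (pvP awards))).items := by
  unfold voteCategories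
  dsimp only
  simp only [pvProc_eq]
  rw [pvFoldl_keys_getD (PySem.Dict.ofList namesAndKeywords) (PySem.Dict.nodup_keys_ofList _)
    (fun t k v => t.insert k (PySem.List.slice v (some (-5)) none)) PySem.Dict.empty]
  have hfresh : ∀ a ∈ (PySem.Dict.ofList namesAndKeywords).items,
      (PySem.Dict.empty : PySem.Dict String (List String)).contains a.1 = false :=
    fun a _ => PySem.Dict.contains_empty _
  have hitems := PySem.Dict.items_foldl_insert_fresh
    (PySem.Dict.ofList namesAndKeywords).items (fun p => p.1)
    (fun p => PySem.List.slice p.2 (some (-5)) none) PySem.Dict.empty hfresh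
    (pvItems_map_fst namesAndKeywords)
  set T := (PySem.Dict.ofList namesAndKeywords).items.foldl
      (fun t p => t.insert p.1 (PySem.List.slice p.2 (some (-5)) none)) PySem.Dict.empty with hT
  have hTitems : T.items = (PySem.Dict.ofList namesAndKeywords).items.map
      (fun p => (p.1, PySem.List.slice p.2 (some (-5)) none)) := by
    rw [hT]; simpa using hitems
  have hTkeys : T.keys.Nodup := by
    show (T.items.map (·.1)).Nodup
    rw [hTitems, List.map_map]
    exact (pvItems_map_fst namesAndKeywords)
  rw [pvFoldl_keys_getD T hTkeys
    (fun pc name kws =>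
      (PySem.Dict.ofList awards).keys.foldl (fun pc award =>
        ((PySem.Dict.ofList awards).getD award []).foldl (fun pc item0 =>
          let item := PySem.Str.lower item0
          if item ∈ kws ∧ item ≠ "best" ∧ item ≠ "award" ∧ item ≠ "picture" ∧ item ≠ "motion" then
            if pc.contains name then pc.modify name [] (fun l => l ++ [award])
            else pc.insert name [award]
          else pc) pc) pc) PySem.Dict.empty]
  simp only [pvA_inner (PySem.Dict.ofList awards) (PySem.Dict.nodup_keys_ofList _)]
  rw [hTitems]
  rw [show List.flatMap (fun q : String × List String => List.map (fun it => (q.1, it)) q.2)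
      (PySem.Dict.ofList awards).items = pvP awards from rfl]
  rw [← List.foldl_flatMap (f := fun p : String × List String => (pvM (pvP awards) p.2).map (fun a => (p.1, a)))
    (g := pvStep)]
  rw [← pvLA_pvL]
  rfl

theorem pvL_fst_nodup (nk : List (String × List String)) : ((pvL nk).map (·.1)).Nodup := by
  have h := PySem.Dict.nodup_keys_ofList nk
  simp only [PySem.Dict.keys] at h
  simpa [pvL, List.map_map, Function.comp] using h

theorem pvL_val_nodup (nk : List (String × List String)) : ∀ p ∈ pvL nk, p.2.Nodup := by
  intro p hp
  simp only [pvL, List.mem_map] at hp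
  obtain ⟨q, _, rfl⟩ := hp
  exact PySem.Set.nodup_ofList _

theorem pvB_row (p1 : String) (kws : List String) (ix : PySem.Dict String (List String)) :
    kws.foldl (fun ix kw => ix.modify kw [] (fun l => l ++ [p1])) ix
      = (kws.map (fun kw => (kw, p1))).foldl pvStep ix := by
  induction kws generalizing ix with
  | nil => rfl
  | cons kw t ih => rw [List.foldl_cons, List.map_cons, List.foldl_cons, ih]; rfl

theorem pvB_index (L : List (String × List String)) (ix : PySem.Dict String (List String)) :
    L.foldl (fun ix p => p.2.foldl (fun ix kw => ix.modify kw [] (fun l => l ++ [p.1])) ix) ix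
      = (L.flatMap (fun p => p.2.map (fun kw => (kw, p.1)))).foldl pvStep ix := by
  induction L generalizing ix with
  | nil => rfl
  | cons p t ih =>
    rw [List.foldl_cons, pvB_row, ih, List.flatMap_cons, List.foldl_append]

theorem pvNodup_filter_beq (l : List String) (hnd : l.Nodup) (w : String) :
    l.filter (fun x => x == w) = if w ∈ l then [w] else [] := by
  induction l with
  | nil => simp
  | cons x t ih =>
    simp only [List.nodup_cons] at hnd
    obtain ⟨hx, hnd'⟩ := hnd
    by_cases hxw : x = w
    · subst hxw
      have : t.filter (fun y => y == x) = [] := by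
        rw [List.filter_eq_nil_iff]; intro y hy hb
        exact hx ((by simpa using hb) ▸ hy)
      simp [this]
    · rw [List.filter_cons]
      simp only [beq_iff_eq, hxw, if_false]
      rw [ih hnd']
      by_cases hw : w ∈ t <;> simp [hw, Ne.symm hxw]

theorem pvIdx (L : List (String × List String)) (hv : ∀ p ∈ L, p.2.Nodup) (w : String) :
    (pvBuild (L.flatMap (fun p => p.2.map (fun kw => (kw, p.1))))).getD w []
      = (L.filter (fun r => decide (w ∈ r.2))).map (·.1) := by
  rw [pvBuild_getD]
  induction L with
  | nil => rfl
  | cons p t ih =>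
    have hv' : ∀ q ∈ t, q.2.Nodup := fun q hq => hv q (List.mem_cons_of_mem _ hq)
    have hvp : p.2.Nodup := hv p List.mem_cons_self
    rw [List.flatMap_cons, List.filter_append, List.map_append, ih hv']
    have hchunk : (((p.2.map (fun kw => (kw, p.1))).filter (fun q => q.1 == w)).map (·.2))
        = if w ∈ p.2 then [p.1] else [] := by
      rw [List.filter_map]
      have : ((fun q : String × String => q.1 == w) ∘ (fun kw => (kw, p.1))) = fun kw => kw == w := rfl
      rw [this, pvNodup_filter_beq p.2 hvp w]
      by_cases hw : w ∈ p.2 <;> simp [hw]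
    rw [hchunk, List.filter_cons]
    by_cases hw : w ∈ p.2 <;> simp [hw]

theorem pvB_acc_item (index : PySem.Dict String (List String)) (q1 : String) (its : List String)
    (acc : PySem.Dict String (List String)) :
    its.foldl (fun acc item =>
        let it := PySem.Str.lower item
        if it ∈ (PySem.Set.ofList ["best", "award", "picture", "motion"] : List String) then acc
        else (index.getD it []).foldl (fun acc name => acc.modify name [] (fun l => l ++ [q1])) acc) acc
      = (its.flatMap (fun item =>
          if PySem.Str.lower item ∈ (PySem.Set.ofList ["best", "award", "picture", "motion"] : List String) then []
          else (index.getD (PySem.Str.lower item) []).map (fun n => (n, q1)))).foldl pvStep acc := by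
  induction its generalizing acc with
  | nil => rfl
  | cons item t ih =>
    rw [List.foldl_cons, List.flatMap_cons, List.foldl_append]
    by_cases h : PySem.Str.lower item ∈ (PySem.Set.ofList ["best", "award", "picture", "motion"] : List String)
    · simp only [h, if_pos]
      exact ih acc
    · simp only [h, ite_false]
      rw [pvB_row, ih]

theorem pvB_acc (index : PySem.Dict String (List String)) (items : List (String × List String))
    (acc : PySem.Dict String (List String)) :
    items.foldl (fun acc q =>
        q.2.foldl (fun acc item =>
          let it := PySem.Str.lower item
          if it ∈ (PySem.Set.ofList ["best", "award", "picture", "motion"] : List String) then acc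
          else (index.getD it []).foldl (fun acc name => acc.modify name [] (fun l => l ++ [q.1])) acc) acc) acc
      = (items.flatMap (fun q => q.2.flatMap (fun item =>
          if PySem.Str.lower item ∈ (PySem.Set.ofList ["best", "award", "picture", "motion"] : List String) then []
          else (index.getD (PySem.Str.lower item) []).map (fun n => (n, q.1))))).foldl pvStep acc := by
  induction items generalizing acc with
  | nil => rfl
  | cons q t ih =>
    rw [List.foldl_cons, pvB_acc_item, ih, List.flatMap_cons, List.foldl_append]

theorem pvNormB (namesAndKeywords awards : List (String × List String)) :
    voteCategories_alt namesAndKeywords awards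
      = (pvL namesAndKeywords).filterMap
          (fun p => ((pvBuild (pvLB (pvL namesAndKeywords) (pvP awards))).get? p.1).map (fun v => (p.1, v))) := by
  unfold voteCategories_alt
  dsimp only
  rw [show (PySem.Dict.ofList namesAndKeywords).items.map
      (fun p => (p.1, (PySem.Set.ofList (PySem.List.slice p.2 (some (-5)) none) : PySem.Set String)))
      = pvL namesAndKeywords from rfl]
  rw [pvB_index (pvL namesAndKeywords) PySem.Dict.empty]
  rw [pvB_acc]
  simp only [show ∀ l : List (String × String), List.foldl pvStep PySem.Dict.empty l = pvBuild l
    from fun _ => rfl]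
  have heq : (PySem.Dict.ofList awards).items.flatMap (fun q => q.2.flatMap (fun item =>
        if PySem.Str.lower item ∈ (PySem.Set.ofList ["best", "award", "picture", "motion"] : List String) then []
        else ((pvBuild ((pvL namesAndKeywords).flatMap (fun p => p.2.map (fun kw => (kw, p.1))))).getD
          (PySem.Str.lower item) []).map (fun n => (n, q.1))))
      = pvLB (pvL namesAndKeywords) (pvP awards) := by
    unfold pvLB pvP
    rw [List.flatMap_assoc]
    simp only [List.flatMap_map, pvIdx (pvL namesAndKeywords) (pvL_val_nodup namesAndKeywords),
      List.map_map]
    rfl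
  rw [heq]
-- ===== VERDICT (by name: the statement is the Claim_ definition above) =====
theorem voteCategories_spec : Claim_equal_voteCategories := by
  intro nk aw _
  unfold Spec_voteCategories
  rw [pvNormA, pvNormB, pvCoreA _ _ (pvL_fst_nodup nk), pvCoreB _ _ (pvL_fst_nodup nk)]
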